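-- pv_equiv track=rewrite | github.com/daun-up/algorithm | 프로그래머스/1/12903. 가운데 글자 가져오기/가운데 글자 가져오기.py | solution
-- ===== SOURCE A (Python) =====
-- def solution(s):
--     answer = ''
--     tmp = s.split()
--     center = int(len(s) / 2)
--     for i in range(len(s)) :
--         if len(s) % 2 == 0 :
--             if i == center :
--                 answer += s[i-1]
--                 answer += s[i]
--         else :
--             if i == center :
--                 answer += s[i]
--     return answer
-- ===== SOURCE B (Python) =====
-- def solution(s):
--     c = len(s) // 2
--     if len(s) % 2 == 0:
--         return s[c-1:c+1]
--     return s[c]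
-- ===== Notes on version B (the rewrite author's own statement) =====
-- stated objective: faster
-- what changed: Replaces the O(n) loop over every index (testing each against the center) with direct center indexing/slicing: c = len(s)//2, s[c-1:c+1] for even length, s[c] for odd.
import Mathlib
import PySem

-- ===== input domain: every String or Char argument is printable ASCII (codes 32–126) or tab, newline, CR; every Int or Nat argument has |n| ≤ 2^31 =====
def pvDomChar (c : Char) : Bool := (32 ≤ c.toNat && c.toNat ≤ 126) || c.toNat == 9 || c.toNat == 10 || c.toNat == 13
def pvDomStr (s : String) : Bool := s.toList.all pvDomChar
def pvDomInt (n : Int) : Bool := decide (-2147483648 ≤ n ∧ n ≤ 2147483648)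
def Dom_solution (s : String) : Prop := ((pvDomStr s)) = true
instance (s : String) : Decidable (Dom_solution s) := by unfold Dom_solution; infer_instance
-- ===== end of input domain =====

-- B replaces A's index-by-index scan with direct center indexing/slicing (objective: simpler).


-- ===== PORT A =====
-- Literal port of A; s[i] / s[i-1] are ported with pyGetD (exact here: the loop only
-- reads them at i = center, where both indices are in range, so Python never raises).
def solution (s : String) : String :=
  let cs := s.toList
  let _tmp := PySem.Chars.split₀ cs          -- tmp = s.split()  (unused, as in A)
  let center : Int := PySem.Int.truncdiv (PySem.List.len cs) 2   -- int(len(s) / 2)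
  let answer :=
    (PySem.List.pyRange 0 (PySem.List.len cs) 1).foldl (fun (answer : List Char) i =>
      if PySem.Int.mod (PySem.List.len cs) 2 = 0 then
        if i = center then (answer ++ [PySem.List.pyGetD cs (i-1) ' ']) ++ [PySem.List.pyGetD cs i ' ']
        else answer
      else
        if i = center then answer ++ [PySem.List.pyGetD cs i ' ']
        else answer) []
  String.ofList answer

-- ===== PORT B =====
-- Literal port of Source B; s[c] in the odd branch is ported with pyGetD (exact: c is in range there).
def solution_alt (s : String) : String :=
  let cs := s.toList
  let c : Int := PySem.Int.floordiv (PySem.List.len cs) 2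
  if PySem.Int.mod (PySem.List.len cs) 2 = 0 then
    String.ofList (PySem.List.slice cs (some (c - 1)) (some (c + 1)))
  else
    String.ofList [PySem.List.pyGetD cs c ' ']

-- ===== PRECONDITION & SPEC =====
def Spec_solution (s : String) (out : String) : Prop := out = solution_alt s
instance (s : String) (out : String) : Decidable (Spec_solution s out) := by unfold Spec_solution; infer_instance

-- ===== CLAIM (what is proved, stated in full; the proofs are below) =====
def Claim_equal_solution : Prop := ∀ (s : String), Dom_solution s → Spec_solution s (solution s)

-- ===== LEMMAS AND PROOFS =====

-- A's loop only appends at i = c: folding 'append x when i = c' over a range appends x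
-- exactly when c lies in the range.
theorem foldl_ite_append {α : Type} (c : Int) (x : List α) :
    ∀ (a b : Int) (acc : List α),
      (PySem.List.pyRange a b 1).foldl (fun ans i => if i = c then ans ++ x else ans) acc
        = acc ++ (if a ≤ c ∧ c < b then x else []) := by
  intro a b
  have h : ∀ (k : Nat) (a : Int) (acc : List α), b - a ≤ (k : Int) →
      (PySem.List.pyRange a b 1).foldl (fun ans i => if i = c then ans ++ x else ans) acc
        = acc ++ (if a ≤ c ∧ c < b then x else []) := by
    intro k
    induction k with
    | zero =>
      intro a acc hk
      rw [PySem.List.pyRange_one_eq_nil (by omega)]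
      rw [if_neg (by omega)]
      simp
    | succ k ih =>
      intro a acc hk
      by_cases hab : b ≤ a
      · rw [PySem.List.pyRange_one_eq_nil hab, if_neg (by omega)]; simp
      · rw [PySem.List.pyRange_one_cons (by omega)]
        simp only [List.foldl_cons]
        rw [ih (a + 1) _ (by omega)]
        by_cases hc : a = c
        · subst hc
          rw [if_pos rfl, if_neg (by omega), if_pos ⟨le_refl _, by omega⟩]
          simp
        · rw [if_neg hc]
          congr 1
          by_cases h2 : a + 1 ≤ c ∧ c < b
          · rw [if_pos h2, if_pos ⟨by omega, h2.2⟩]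
          · rw [if_neg h2, if_neg (by omega)]
  intro acc
  exact h (b - a).toNat a acc (by omega)

-- the first two elements of a drop, as a two-element list
theorem take_two_drop {α : Type} (k : Nat) (l : List α) (h : k + 1 < l.length) :
    (l.drop k).take 2 = [l[k], l[k+1]] := by
  rw [List.drop_eq_getElem_cons (l := l) (by omega : k < l.length)]
  rw [List.drop_eq_getElem_cons (l := l) (by omega : k + 1 < l.length)]
  rfl

theorem solution_eq_alt (s : String) : solution s = solution_alt s := by
  simp only [solution, solution_alt, PySem.List.len_eq]
  set cs := s.toList with hcs
  -- int(len(s)/2) (truncating) and len(s)//2 (flooring) both equal the Nat division on a length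
  have h1 : PySem.Int.truncdiv (cs.length : Int) 2 = ((cs.length / 2 : Nat) : Int) := by
    simp [PySem.Int.truncdiv]
  have h2 : PySem.Int.floordiv (cs.length : Int) 2 = ((cs.length / 2 : Nat) : Int) := by
    rw [PySem.Int.floordiv_eq_ediv_of_pos (by omega)]
    omega
  simp only [h1, h2]
  by_cases hpar : PySem.Int.mod (cs.length : Int) 2 = 0
  · -- even length
    have hmod : PySem.Int.mod (cs.length : Int) 2 = (cs.length : Int) % 2 :=
      PySem.Int.mod_eq_emod_of_pos (by omega)
    have hev : cs.length % 2 = 0 := by rw [hmod] at hpar; omega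
    rw [if_pos hpar]
    have hfn : (fun (ans : List Char) i =>
        if PySem.Int.mod (cs.length : Int) 2 = 0 then
          if i = ((cs.length / 2 : Nat) : Int) then
            (ans ++ [PySem.List.pyGetD cs (i-1) ' ']) ++ [PySem.List.pyGetD cs i ' ']
          else ans
        else if i = ((cs.length / 2 : Nat) : Int) then ans ++ [PySem.List.pyGetD cs i ' '] else ans)
        = (fun ans i => if i = ((cs.length / 2 : Nat) : Int) then
            ans ++ [PySem.List.pyGetD cs (((cs.length / 2 : Nat) : Int) - 1) ' ',
                    PySem.List.pyGetD cs ((cs.length / 2 : Nat) : Int) ' ']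
          else ans) := by
      funext ans i
      rw [if_pos hpar]
      by_cases hi : i = ((cs.length / 2 : Nat) : Int)
      · subst hi; simp
      · rw [if_neg hi, if_neg hi]
    rw [hfn, foldl_ite_append]
    set m := cs.length / 2 with hmdef
    have hm : cs.length = 2 * m := by omega
    rcases Nat.eq_zero_or_pos m with hm0 | hm1
    · -- empty string: loop never runs, and the slice of [] is []
      have hnil : cs = [] := List.length_eq_zero_iff.mp (by omega)
      rw [if_neg (by omega)]
      rw [hnil]
      simp [PySem.List.slice]
    · -- length 2m, m >= 1: the loop appends cs[m-1] and cs[m]; the slice is the same pair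
      rw [if_pos (⟨by positivity, by omega⟩ : _ ∧ _)]
      rw [show ((m : Int) - 1) = ((m - 1 : Nat) : Int) from by omega,
          show ((m : Int) + 1) = ((m + 1 : Nat) : Int) from by omega]
      simp only [PySem.List.pyGetD_natCast]
      rw [PySem.List.slice_natCast]
      rw [show m + 1 - (m - 1) = 2 from by omega]
      rw [take_two_drop (m-1) cs (by omega)]
      rw [List.getD_eq_getElem cs ' ' (by omega : m - 1 < cs.length),
          List.getD_eq_getElem cs ' ' (by omega : m < cs.length)]
      simp [show m - 1 + 1 = m from by omega]
  · -- odd length: both sides are the single center character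
    have hmod : PySem.Int.mod (cs.length : Int) 2 = (cs.length : Int) % 2 :=
      PySem.Int.mod_eq_emod_of_pos (by omega)
    have hodd : cs.length % 2 = 1 := by rw [hmod] at hpar; omega
    rw [if_neg hpar]
    have hfn : (fun (ans : List Char) i =>
        if PySem.Int.mod (cs.length : Int) 2 = 0 then
          if i = ((cs.length / 2 : Nat) : Int) then
            (ans ++ [PySem.List.pyGetD cs (i-1) ' ']) ++ [PySem.List.pyGetD cs i ' ']
          else ans
        else if i = ((cs.length / 2 : Nat) : Int) then ans ++ [PySem.List.pyGetD cs i ' '] else ans)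
        = (fun ans i => if i = ((cs.length / 2 : Nat) : Int) then
            ans ++ [PySem.List.pyGetD cs ((cs.length / 2 : Nat) : Int) ' '] else ans) := by
      funext ans i
      rw [if_neg hpar]
      by_cases hi : i = ((cs.length / 2 : Nat) : Int)
      · subst hi; simp
      · rw [if_neg hi, if_neg hi]
    rw [hfn, foldl_ite_append]
    rw [if_pos (⟨by positivity, by push_cast; omega⟩ : _ ∧ _)]
    simp

-- ===== VERDICT (by name: the statement is the Claim_ definition above) =====
theorem solution_spec : Claim_equal_solution := by
  intro s _
  unfold Spec_solution
  exact solution_eq_alt s
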